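-- pv_equiv track=rewrite | github.com/deysantanu84/python-portfolio | problemSolving/hashing/pPlusQEqualsRPlusS.py | equals
-- ===== SOURCE A (Python) =====
-- def equals(A):
--     result = []
--     indexDict = {}
--
--     for i in range(len(A) - 1):
--         for j in range(i + 1, len(A)):
--             tempSum = A[i] + A[j]
--             if tempSum in indexDict.keys():
--                 if indexDict[tempSum][0] < i \
--                         and indexDict[tempSum][1] != i \
--                         and indexDict[tempSum][1] != j:
--                     currResult = [indexDict[tempSum][0], indexDict[tempSum][1], i, j]
--                     if len(result) == 0 or result > currResult:
--                         result = currResult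
--             else:
--                 indexDict[tempSum] = (i, j)
--     return result
-- ===== SOURCE B (Python) =====
-- def equals(A):
--     n = len(A)
--     # pass 1: group all index pairs (i, j), i < j, by their element sum, in iteration order
--     groups = {}
--     for i in range(n - 1):
--         for j in range(i + 1, n):
--             groups.setdefault(A[i] + A[j], []).append((i, j))
--     # pass 2: the first pair of each group is the anchor; later pairs of the group form candidates
--     best = []
--     for g in groups.values():
--         p0, q0 = g[0]
--         for (i, j) in g[1:]:
--             if p0 < i and q0 != i and q0 != j:
--                 cand = [p0, q0, i, j]
--                 if not best or cand < best:
--                     best = cand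
--     return best
-- ===== Notes on version B (the rewrite author's own statement) =====
-- stated objective: alternative
-- what changed: Single interleaved pass (first-pair dict consulted and extended while scanning, min kept inline) replaced by a two-phase group-by: first build sum -> list-of-pairs, then scan each group against its first pair as anchor; equality holds because the per-sum anchor is the same first pair and the lexicographic minimum is order-independent.
import Mathlib
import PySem

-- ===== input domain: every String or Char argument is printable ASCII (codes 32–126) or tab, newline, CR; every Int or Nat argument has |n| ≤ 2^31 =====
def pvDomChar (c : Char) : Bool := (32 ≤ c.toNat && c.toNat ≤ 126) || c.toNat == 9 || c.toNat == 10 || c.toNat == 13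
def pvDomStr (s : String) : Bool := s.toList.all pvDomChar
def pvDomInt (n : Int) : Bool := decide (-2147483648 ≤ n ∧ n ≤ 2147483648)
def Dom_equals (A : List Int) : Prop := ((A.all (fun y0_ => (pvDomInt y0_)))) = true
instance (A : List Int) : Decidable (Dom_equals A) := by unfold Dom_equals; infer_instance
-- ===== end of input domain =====

-- B re-implements A as a two-phase group-by (sum -> list of pairs, then per-group scan against the
-- first pair as anchor) instead of A's single interleaved pass; objective: alternative decomposition.
-- Python list comparison 'result > currResult' / 'cand < best' is Lean's '<' on List Int (lexicographic
-- with length tiebreak), which matches Python's list ordering on integer lists.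

-- ===== PORT A =====
def equals (A : List Int) : List Int :=
  let n : Int := (A.length : Int)
  let st :=
    (PySem.List.pyRange 0 (n - 1) 1).foldl (fun st i =>
      (PySem.List.pyRange (i + 1) n 1).foldl (fun st j =>
        let tempSum := PySem.List.pyGetD A i 0 + PySem.List.pyGetD A j 0
        match st.2.get? tempSum with
        | some pq =>
            if pq.1 < i ∧ pq.2 ≠ i ∧ pq.2 ≠ j then
              let currResult := [pq.1, pq.2, i, j]
              if st.1 = [] ∨ currResult < st.1 then (currResult, st.2) else st
            else st
        | none => (st.1, st.2.insert tempSum (i, j))) st)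
      (([] : List Int), (PySem.Dict.empty : PySem.Dict Int (Int × Int)))
  st.1

-- ===== PORT B =====
-- Source B's 'groups.setdefault(s, []).append((i, j))' is ported as 'modify s [] (· ++ [(i, j)])'
-- (get with default [], append, store back) — exact on the dict's value and key order.
def equals_alt (A : List Int) : List Int :=
  let n : Int := (A.length : Int)
  let groups :=
    (PySem.List.pyRange 0 (n - 1) 1).foldl (fun d i =>
      (PySem.List.pyRange (i + 1) n 1).foldl (fun d j =>
        d.modify (PySem.List.pyGetD A i 0 + PySem.List.pyGetD A j 0) [] (· ++ [(i, j)])) d)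
      (PySem.Dict.empty : PySem.Dict Int (List (Int × Int)))
  groups.values.foldl (fun best g =>
    match g with
    | [] => best
    | (p0, q0) :: rest =>
        rest.foldl (fun best pr =>
          if p0 < pr.1 ∧ q0 ≠ pr.1 ∧ q0 ≠ pr.2 then
            let cand := [p0, q0, pr.1, pr.2]
            if best = [] ∨ cand < best then cand else best
          else best) best) []

-- ===== PRECONDITION & SPEC =====
def Spec_equals (A : List Int) (out : List Int) : Prop := out = equals_alt A
instance (A : List Int) (out : List Int) : Decidable (Spec_equals A out) := by unfold Spec_equals; infer_instance

-- ===== CLAIM (what is proved, stated in full; the proofs are below) =====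
def Claim_equal_equals : Prop := ∀ (A : List Int), Dom_equals A → Spec_equals A (equals A)

-- ===== LEMMAS AND PROOFS =====

-- the pair-sum and the iteration order of the nested loops, shared by the analyses of both ports
def pvSum (A : List Int) (p : Int × Int) : Int :=
  PySem.List.pyGetD A p.1 0 + PySem.List.pyGetD A p.2 0

def pvPairs (A : List Int) : List (Int × Int) :=
  (PySem.List.pyRange 0 ((A.length : Int) - 1) 1).flatMap (fun i =>
    (PySem.List.pyRange (i + 1) (A.length : Int) 1).map (fun j => (i, j)))

-- the 'keep the lexicographically smaller, [] means empty so far' update both Pythons perform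
def pvStep (r c : List Int) : List Int := if r = [] ∨ c < r then c else r

-- A's loop body on the pair stream
def pvStepA (A : List Int) (st : List Int × PySem.Dict Int (Int × Int)) (p : Int × Int) :
    List Int × PySem.Dict Int (Int × Int) :=
  match st.2.get? (pvSum A p) with
  | some pq =>
      if pq.1 < p.1 ∧ pq.2 ≠ p.1 ∧ pq.2 ≠ p.2 then
        (pvStep st.1 [pq.1, pq.2, p.1, p.2], st.2)
      else st
  | none => (st.1, st.2.insert (pvSum A p) p)

def pvDictStep (A : List Int) (d : PySem.Dict Int (Int × Int)) (p : Int × Int) :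
    PySem.Dict Int (Int × Int) :=
  if (d.get? (pvSum A p)).isSome then d else d.insert (pvSum A p) p

def pvDictOf (A : List Int) (pre : List (Int × Int)) : PySem.Dict Int (Int × Int) :=
  pre.foldl (pvDictStep A) PySem.Dict.empty

def pvFirst (A : List Int) (L : List (Int × Int)) (s : Int) : Option (Int × Int) :=
  (L.filter (fun q => pvSum A q == s)).head?

def pvCand (A : List Int) (L : List (Int × Int)) (p : Int × Int) : Option (List Int) :=
  match pvFirst A L (pvSum A p) with
  | some pq =>
      if pq.1 < p.1 ∧ pq.2 ≠ p.1 ∧ pq.2 ≠ p.2 then some [pq.1, pq.2, p.1, p.2] else none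
  | none => none

def pvCands (A : List Int) (pre rest : List (Int × Int)) : List (List Int) :=
  match rest with
  | [] => []
  | p :: rest' => (pvCand A pre p).toList ++ pvCands A (pre ++ [p]) rest'

def pvGCands (g : List (Int × Int)) : List (List Int) :=
  match g with
  | [] => []
  | pq :: rest =>
      rest.filterMap (fun p =>
        if pq.1 < p.1 ∧ pq.2 ≠ p.1 ∧ pq.2 ≠ p.2 then some [pq.1, pq.2, p.1, p.2] else none)

def pvGroups (A : List Int) : PySem.Dict Int (List (Int × Int)) :=
  (pvPairs A).foldl (fun d p => d.modify (pvSum A p) [] (· ++ [p])) PySem.Dict.empty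

-- ---- port A as a fold over the pair stream ----
theorem equals_eq_fold (A : List Int) :
    equals A = ((pvPairs A).foldl (pvStepA A) (([] : List Int), PySem.Dict.empty)).1 := by
  simp only [equals]
  congr 1
  rw [pvPairs, List.foldl_flatMap]
  apply List.foldl_ext
  intro st i _
  rw [List.foldl_map]
  apply List.foldl_ext
  intro st' j _
  show _ = pvStepA A st' (i, j)
  simp only [pvStepA, pvStep, pvSum]
  cases h : st'.2.get? (PySem.List.pyGetD A i 0 + PySem.List.pyGetD A j 0) with
  | none => rfl
  | some pq => dsimp only []; split_ifs <;> rfl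

-- ---- port B as a fold over the group dict values ----
theorem pv_foldl_filterMap {α : Type} :
    ∀ (l : List α) (f : α → Option (List Int)) (b : List Int),
      l.foldl (fun b x => match f x with | some c => pvStep b c | none => b) b =
        (l.filterMap f).foldl pvStep b := by
  intro l
  induction l with
  | nil => intro f b; rfl
  | cons a l ih =>
      intro f b
      simp only [List.foldl_cons, List.filterMap_cons]
      cases h : f a with
      | none => exact ih f b
      | some c => simp only [List.foldl_cons]; exact ih f (pvStep b c)

theorem pvGroups_eq_port (A : List Int) :
    (PySem.List.pyRange 0 ((A.length : Int) - 1) 1).foldl (fun d i =>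
      (PySem.List.pyRange (i + 1) (A.length : Int) 1).foldl (fun d j =>
        d.modify (PySem.List.pyGetD A i 0 + PySem.List.pyGetD A j 0) [] (· ++ [(i, j)])) d)
      (PySem.Dict.empty : PySem.Dict Int (List (Int × Int))) = pvGroups A := by
  rw [pvGroups, pvPairs, List.foldl_flatMap]
  apply List.foldl_ext
  intro d i _
  rw [List.foldl_map]
  rfl

theorem equals_alt_eq_fold (A : List Int) :
    equals_alt A =
      ((pvGroups A).values.flatMap pvGCands).foldl pvStep [] := by
  simp only [equals_alt]
  rw [pvGroups_eq_port, List.foldl_flatMap]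
  apply List.foldl_ext
  intro b g _
  cases g with
  | nil => rfl
  | cons pq rest =>
      obtain ⟨p0, q0⟩ := pq
      show rest.foldl _ b = (pvGCands ((p0, q0) :: rest)).foldl pvStep b
      rw [pvGCands, ← pv_foldl_filterMap]
      apply List.foldl_ext
      intro b' pr _
      by_cases hc : p0 < pr.1 ∧ q0 ≠ pr.1 ∧ q0 ≠ pr.2
      · simp [hc, pvStep]
      · simp [hc]

-- ---- A-side characterization ----
theorem dictOf_get? (A : List Int) :
    ∀ (l : List (Int × Int)) (d : PySem.Dict Int (Int × Int)) (s : Int),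
      (l.foldl (pvDictStep A) d).get? s = (d.get? s).or (pvFirst A l s) := by
  intro l
  induction l with
  | nil => intro d s; simp [pvFirst]
  | cons p l ih =>
      intro d s
      rw [List.foldl_cons, ih]
      have hfirst : pvFirst A (p :: l) s =
          if pvSum A p == s then some p else pvFirst A l s := by
        simp only [pvFirst, List.filter_cons]
        split <;> simp
      by_cases hp : (d.get? (pvSum A p)).isSome
      · rw [pvDictStep, if_pos hp, hfirst]
        by_cases hs : pvSum A p == s
        · have hs' : pvSum A p = s := by simpa using hs
          obtain ⟨v, hv⟩ := Option.isSome_iff_exists.1 hp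
          rw [hs'] at hv
          simp [hv, hs]
        · simp [hs]
      · rw [pvDictStep, if_neg hp, hfirst]
        have hd : d.get? (pvSum A p) = none := Option.not_isSome_iff_eq_none.1 hp
        rw [PySem.Dict.get?_insert]
        by_cases hs : s = pvSum A p
        · subst hs
          simp [hd, BEq.rfl]
        · have hs2 : (pvSum A p == s) = false := by
            simpa using fun h => hs h.symm
          simp [hs, hs2]

theorem pvDictOf_get? (A : List Int) (pre : List (Int × Int)) (s : Int) :
    (pvDictOf A pre).get? s = pvFirst A pre s := by
  have := dictOf_get? A pre PySem.Dict.empty s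
  simpa [pvDictOf, PySem.Dict.get?_empty] using this

theorem pvDictOf_append (A : List Int) (pre : List (Int × Int)) (p : Int × Int) :
    pvDictOf A (pre ++ [p]) = pvDictStep A (pvDictOf A pre) p := by
  simp [pvDictOf, List.foldl_append]

theorem foldA_eq (A : List Int) :
    ∀ (rest pre : List (Int × Int)) (r : List Int),
      (rest.foldl (pvStepA A) (r, pvDictOf A pre)).1 = (pvCands A pre rest).foldl pvStep r := by
  intro rest
  induction rest with
  | nil => intro pre r; simp [pvCands]
  | cons p rest ih =>
      intro pre r
      rw [List.foldl_cons, pvCands]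
      cases hf : pvFirst A pre (pvSum A p) with
      | none =>
          have h1 : pvStepA A (r, pvDictOf A pre) p = (r, pvDictOf A (pre ++ [p])) := by
            rw [pvStepA]
            simp only [pvDictOf_get? A pre, hf]
            rw [pvDictOf_append, pvDictStep]
            simp [pvDictOf_get? A pre, hf]
          rw [h1, ih]
          simp [pvCand, hf]
      | some pq =>
          have hdict2 : pvDictOf A (pre ++ [p]) = pvDictOf A pre := by
            rw [pvDictOf_append, pvDictStep]
            simp [pvDictOf_get? A pre, hf]
          by_cases hc : pq.1 < p.1 ∧ pq.2 ≠ p.1 ∧ pq.2 ≠ p.2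
          · have h1 : pvStepA A (r, pvDictOf A pre) p =
                (pvStep r [pq.1, pq.2, p.1, p.2], pvDictOf A (pre ++ [p])) := by
              rw [pvStepA]
              simp [pvDictOf_get? A pre, hf, hc, hdict2]
            rw [h1, ih]
            simp [pvCand, hf, hc]
          · have h1 : pvStepA A (r, pvDictOf A pre) p = (r, pvDictOf A (pre ++ [p])) := by
              rw [pvStepA]
              simp [pvDictOf_get? A pre, hf, hc, hdict2]
            rw [h1, ih]
            simp [pvCand, hf, hc]

theorem pvCand_head (A : List Int) (pre rest : List (Int × Int)) (q : Int × Int) (c : List Int) :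
    pvCand A pre q = some c ↔ pvCand A (pre ++ q :: rest) q = some c := by
  have hfilt : pvFirst A (pre ++ q :: rest) (pvSum A q) =
      (pvFirst A pre (pvSum A q)).or (pvFirst A (q :: rest) (pvSum A q)) := by
    simp [pvFirst, List.filter_append, List.head?_append]
  have hhead : pvFirst A (q :: rest) (pvSum A q) = some q := by
    simp [pvFirst]
  rw [pvCand, pvCand, hfilt, hhead]
  cases hf : pvFirst A pre (pvSum A q) with
  | some pq => simp
  | none =>
      simp only [Option.none_or]
      constructor
      · intro h; exact absurd h (by simp)
      · intro h
        rw [if_neg (by intro hcc; exact absurd hcc.1 (lt_irrefl q.1))] at h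
        exact absurd h (by simp)

theorem mem_pvCands (A : List Int) :
    ∀ (rest pre : List (Int × Int)) (c : List Int),
      c ∈ pvCands A pre rest ↔ ∃ p ∈ rest, pvCand A (pre ++ rest) p = some c := by
  intro rest
  induction rest with
  | nil => intro pre c; simp [pvCands]
  | cons q rest ih =>
      intro pre c
      rw [pvCands]
      simp only [List.mem_append, Option.mem_toList]
      rw [ih (pre ++ [q])]
      have hass : (pre ++ [q]) ++ rest = pre ++ q :: rest := by simp
      rw [hass]
      constructor
      · rintro (h | ⟨p, hp, h⟩)
        · exact ⟨q, List.mem_cons_self, (pvCand_head A pre rest q c).1 h⟩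
        · exact ⟨p, List.mem_cons_of_mem _ hp, h⟩
      · rintro ⟨p, hp, h⟩
        rcases List.mem_cons.1 hp with rfl | hp'
        · exact Or.inl ((pvCand_head A pre rest p c).2 h)
        · exact Or.inr ⟨p, hp', h⟩

-- ---- B-side characterization ----
theorem pvGroups_getD (A : List Int) (s : Int) :
    (pvGroups A).getD s [] = (pvPairs A).filter (fun p => pvSum A p == s) := by
  have hkv : pvGroups A = ((pvPairs A).map (fun p => (pvSum A p, p))).foldl
      (fun d x => d.modify x.1 [] (· ++ [x.2])) PySem.Dict.empty := by
    rw [pvGroups, List.foldl_map]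
  rw [hkv, PySem.Dict.getD_foldl_modify_append, PySem.Dict.getD_empty]
  rw [List.filter_map, List.map_map]
  simp [Function.comp_def]

theorem pvGroups_keys_nodup (A : List Int) : (pvGroups A).keys.Nodup := by
  rw [pvGroups]
  exact PySem.Dict.nodup_keys_foldl_modify_key _ _ _ _ _ PySem.Dict.nodup_keys_empty

theorem pvGroups_keys (A : List Int) :
    (pvGroups A).keys = PySem.Set.ofList ((pvPairs A).map (pvSum A)) := by
  rw [pvGroups, PySem.Dict.keys_foldl_modify_key]
  simp [PySem.Dict.keys_empty, PySem.Set.update_nil_left]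

theorem pvGroups_values (A : List Int) :
    (pvGroups A).values =
      (PySem.Set.ofList ((pvPairs A).map (pvSum A))).map
        (fun s => (pvPairs A).filter (fun p => pvSum A p == s)) := by
  rw [PySem.Dict.values_eq_map_keys _ (pvGroups_keys_nodup A) [], pvGroups_keys]
  exact List.map_congr_left (fun s _ => pvGroups_getD A s)

theorem mem_candsB (A : List Int) (c : List Int) :
    c ∈ (pvGroups A).values.flatMap pvGCands ↔
      ∃ p ∈ pvPairs A, pvCand A (pvPairs A) p = some c := by
  rw [pvGroups_values]
  simp only [List.mem_flatMap, List.mem_map]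
  constructor
  · rintro ⟨g, ⟨s, hs, rfl⟩, hc⟩
    cases hG : (pvPairs A).filter (fun p => pvSum A p == s) with
    | nil => rw [hG] at hc; simp [pvGCands] at hc
    | cons pq rest =>
        rw [hG] at hc
        rw [pvGCands] at hc
        rcases List.mem_filterMap.1 hc with ⟨p, hp, hcond⟩
        have hpG : p ∈ (pvPairs A).filter (fun p => pvSum A p == s) := by
          rw [hG]; exact List.mem_cons_of_mem _ hp
        have hpP : p ∈ pvPairs A := List.mem_of_mem_filter hpG
        have hps : pvSum A p = s := by simpa using List.of_mem_filter hpG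
        refine ⟨p, hpP, ?_⟩
        rw [pvCand, pvFirst, hps, hG]
        exact hcond
  · rintro ⟨p, hp, hcand⟩
    rw [pvCand] at hcand
    cases hf : pvFirst A (pvPairs A) (pvSum A p) with
    | none => simp only [hf] at hcand; exact absurd hcand (by simp)
    | some pq =>
        simp only [hf] at hcand
        by_cases hcnd : pq.1 < p.1 ∧ pq.2 ≠ p.1 ∧ pq.2 ≠ p.2
        · rw [if_pos hcnd] at hcand
          obtain ⟨rest, hG⟩ : ∃ t, (pvPairs A).filter
              (fun q => pvSum A q == pvSum A p) = pq :: t :=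
            List.head?_eq_some_iff.1 hf
          refine ⟨(pvPairs A).filter (fun q => pvSum A q == pvSum A p),
            ⟨pvSum A p, ?_, rfl⟩, ?_⟩
          · rw [PySem.Set.mem_ofList]
            exact List.mem_map.2 ⟨p, hp, rfl⟩
          · rw [hG, pvGCands]
            have hpG : p ∈ (pvPairs A).filter (fun q => pvSum A q == pvSum A p) :=
              List.mem_filter.2 ⟨hp, by simp⟩
            rw [hG] at hpG
            have hpne : p ≠ pq := by
              intro h; exact absurd hcnd.1 (by rw [h]; exact lt_irrefl pq.1)
            have hpt : p ∈ rest := by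
              rcases List.mem_cons.1 hpG with h | h
              · exact absurd h hpne
              · exact h
            exact List.mem_filterMap.2 ⟨p, hpt, by rw [if_pos hcnd]; exact hcand⟩
        · rw [if_neg hcnd] at hcand
          exact absurd hcand (by simp)

-- ---- the minimum fold only depends on the set of candidates ----
theorem pvStep_fold_spec :
    ∀ (l : List (List Int)) (r : List Int), r ≠ [] → (∀ c ∈ l, c ≠ []) →
      (l.foldl pvStep r ≠ [] ∧ (l.foldl pvStep r = r ∨ l.foldl pvStep r ∈ l) ∧
        l.foldl pvStep r ≤ r ∧ ∀ c ∈ l, l.foldl pvStep r ≤ c) := by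
  intro l
  induction l with
  | nil =>
      intro r hr _
      exact ⟨hr, Or.inl rfl, le_refl r, fun c hc => absurd hc List.not_mem_nil⟩
  | cons c l ih =>
      intro r hr hl
      have hc0 : c ≠ [] := hl c List.mem_cons_self
      have hl' : ∀ d ∈ l, d ≠ [] := fun d hd => hl d (List.mem_cons_of_mem _ hd)
      rw [List.foldl_cons, pvStep]
      by_cases hlt : c < r
      · rw [if_pos (Or.inr hlt)]
        obtain ⟨h1, h2, h3, h4⟩ := ih c hc0 hl'
        refine ⟨h1, ?_, le_trans h3 (le_of_lt hlt), ?_⟩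
        · rcases h2 with h | h
          · exact Or.inr (by rw [h]; exact List.mem_cons_self)
          · exact Or.inr (List.mem_cons_of_mem _ h)
        · intro d hd
          rcases List.mem_cons.1 hd with rfl | hd'
          · exact h3
          · exact h4 d hd'
      · rw [if_neg (by rintro (h | h); exact hr h; exact hlt h)]
        obtain ⟨h1, h2, h3, h4⟩ := ih r hr hl'
        refine ⟨h1, ?_, h3, ?_⟩
        · rcases h2 with h | h
          · exact Or.inl h
          · exact Or.inr (List.mem_cons_of_mem _ h)
        · intro d hd
          rcases List.mem_cons.1 hd with rfl | hd'
          · exact le_trans h3 (not_lt.1 hlt)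
          · exact h4 d hd'

theorem pvStep_fold_min (l : List (List Int)) (h : ∀ c ∈ l, c ≠ []) (hne : l ≠ []) :
    l.foldl pvStep [] ∈ l ∧ ∀ c ∈ l, l.foldl pvStep [] ≤ c := by
  cases l with
  | nil => exact absurd rfl hne
  | cons c l =>
      rw [List.foldl_cons]
      have hstep : pvStep [] c = c := by rw [pvStep, if_pos (Or.inl rfl)]
      rw [hstep]
      have hc : c ≠ [] := h c List.mem_cons_self
      obtain ⟨h1, h2, h3, h4⟩ := pvStep_fold_spec l c hc
        (fun d hd => h d (List.mem_cons_of_mem _ hd))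
      constructor
      · rcases h2 with heq | hmem
        · rw [heq]; exact List.mem_cons_self
        · exact List.mem_cons_of_mem _ hmem
      · intro d hd
        rcases List.mem_cons.1 hd with rfl | hd'
        · exact h3
        · exact h4 d hd'

theorem pvStep_fold_ext (l₁ l₂ : List (List Int))
    (h₁ : ∀ c ∈ l₁, c ≠ []) (h₂ : ∀ c ∈ l₂, c ≠ [])
    (hm : ∀ c, c ∈ l₁ ↔ c ∈ l₂) :
    l₁.foldl pvStep [] = l₂.foldl pvStep [] := by
  cases hl₁ : l₁ with
  | nil =>
      cases hl₂ : l₂ with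
      | nil => rfl
      | cons d t =>
          exfalso
          have : d ∈ l₁ := (hm d).2 (by rw [hl₂]; exact List.mem_cons_self)
          rw [hl₁] at this; exact absurd this List.not_mem_nil
  | cons c t₁ =>
      have hne₁ : l₁ ≠ [] := by rw [hl₁]; simp
      have hne₂ : l₂ ≠ [] := by
        intro h
        have : c ∈ l₂ := (hm c).1 (by rw [hl₁]; exact List.mem_cons_self)
        rw [h] at this; exact absurd this List.not_mem_nil
      rw [← hl₁]
      obtain ⟨m1, m1le⟩ := pvStep_fold_min l₁ h₁ hne₁
      obtain ⟨m2, m2le⟩ := pvStep_fold_min l₂ h₂ hne₂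
      exact le_antisymm (m1le _ ((hm _).2 m2)) (m2le _ ((hm _).1 m1))

theorem pvCand_ne_nil (A : List Int) (L : List (Int × Int)) (p : Int × Int) (c : List Int)
    (h : pvCand A L p = some c) : c ≠ [] := by
  rw [pvCand] at h
  cases hf : pvFirst A L (pvSum A p) with
  | none => simp only [hf] at h; exact absurd h (by simp)
  | some pq =>
      simp only [hf] at h
      by_cases hc : pq.1 < p.1 ∧ pq.2 ≠ p.1 ∧ pq.2 ≠ p.2
      · rw [if_pos hc] at h
        cases h; simp
      · rw [if_neg hc] at h; exact absurd h (by simp)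

-- ===== VERDICT (by name: the statement is the Claim_ definition above) =====
theorem equals_spec : Claim_equal_equals := by
  intro A _
  unfold Spec_equals
  have hA : equals A = (pvCands A [] (pvPairs A)).foldl pvStep [] := by
    rw [equals_eq_fold]
    have := foldA_eq A (pvPairs A) [] []
    simpa [pvDictOf] using this
  rw [hA, equals_alt_eq_fold]
  apply pvStep_fold_ext
  · intro c hc
    rcases (mem_pvCands A (pvPairs A) [] c).1 hc with ⟨p, _, hp⟩
    exact pvCand_ne_nil A _ p c hp
  · intro c hc
    rcases (mem_candsB A c).1 hc with ⟨p, _, hp⟩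
    exact pvCand_ne_nil A _ p c hp
  · intro c
    rw [mem_pvCands A (pvPairs A) [] c, mem_candsB A c]
    simp
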